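-- pv_equiv track=rewrite | github.com/wonjin94/file_cleaner | clean.py | has_spaces
-- ===== SOURCE A (Python) =====
-- def has_spaces(file_name):
--     file_name_separated = []
--     num_space = 0
--
--     dict = set(["-","_"," "])
--     # previous index that had a space " "
--     psi = -1
--     for i in range(len(file_name)):
--         if file_name[i] in dict:
--             num_space += 1
--             file_name_separated.append(file_name[psi+1:i])
--             psi = i
--     file_name_separated.append(file_name[psi+1:])
--     return num_space,file_name_separated
-- ===== SOURCE B (Python) =====
-- def has_spaces(file_name):
--     # Single character-level fold: grow the current segment or close it off;
--     # the separator count falls out as len(segments) - 1 (no index/slice bookkeeping).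
--     done = []         # finished segments, in order
--     cur = ''          # segment being built
--     for ch in file_name:
--         if ch == '-' or ch == '_' or ch == ' ':
--             done.append(cur)
--             cur = ''
--         else:
--             cur += ch
--     segs = done + [cur]
--     return len(segs) - 1, segs
-- ===== Notes on version B (the rewrite author's own statement) =====
-- stated objective: simpler
-- what changed: Replaces A's index loop with psi tracking and explicit slicing by a single character fold that accumulates the current segment directly and derives the separator count as len(segments)-1.
import Mathlib
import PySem

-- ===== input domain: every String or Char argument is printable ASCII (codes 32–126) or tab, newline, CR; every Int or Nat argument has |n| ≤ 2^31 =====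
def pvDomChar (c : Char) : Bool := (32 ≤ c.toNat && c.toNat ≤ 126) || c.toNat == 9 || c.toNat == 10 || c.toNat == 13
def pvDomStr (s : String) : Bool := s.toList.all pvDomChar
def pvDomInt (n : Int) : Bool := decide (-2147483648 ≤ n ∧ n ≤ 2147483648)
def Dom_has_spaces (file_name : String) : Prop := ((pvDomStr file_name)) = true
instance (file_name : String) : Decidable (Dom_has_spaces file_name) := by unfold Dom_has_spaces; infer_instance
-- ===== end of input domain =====

-- B replaces A's index loop + psi tracking + slicing by one character fold that
-- accumulates the current segment and derives the count as len(segments)-1 (objective: simpler).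

-- ===== PORT A =====
-- the set(["-","_"," "]) of A
def hsDict : PySem.Set Char := PySem.Set.ofList ['-', '_', ' ']

-- loop body of A: state = (file_name_separated, num_space, psi), i the loop index
def hsStep (cs : List Char) (st : List String × Int × Int) (i : Int) : List String × Int × Int :=
  match PySem.List.pyGet? cs i with
  | none => st
  | some c =>
    if PySem.Set.contains hsDict c then
      (st.1 ++ [String.ofList (PySem.List.slice cs (some (st.2.2 + 1)) (some i))], st.2.1 + 1, i)
    else st

def has_spaces (file_name : String) : Int × List String :=
  let cs := file_name.toList
  let st := (PySem.List.pyRange 0 (cs.length : Int) 1).foldl (hsStep cs) ([], 0, -1)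
  (st.2.1, st.1 ++ [String.ofList (PySem.List.slice cs (some (st.2.2 + 1)) none)])

-- ===== PORT B =====
-- loop body of B: state = (done segments, current segment's chars)
def altStep (st : List String × List Char) (c : Char) : List String × List Char :=
  if c = '-' ∨ c = '_' ∨ c = ' ' then (st.1 ++ [String.ofList st.2], []) else (st.1, st.2 ++ [c])

def has_spaces_alt (file_name : String) : Int × List String :=
  let st := file_name.toList.foldl altStep ([], [])
  let segs := st.1 ++ [String.ofList st.2]
  ((segs.length : Int) - 1, segs)

-- ===== PRECONDITION & SPEC =====
def Spec_has_spaces (file_name : String) (out : Int × List String) : Prop := out = has_spaces_alt file_name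
instance (file_name : String) (out : Int × List String) : Decidable (Spec_has_spaces file_name out) := by unfold Spec_has_spaces; infer_instance

-- ===== CLAIM (what is proved, stated in full; the proofs are below) =====
def Claim_equal_has_spaces : Prop := ∀ (file_name : String), Dom_has_spaces file_name → Spec_has_spaces file_name (has_spaces file_name)

-- ===== LEMMAS AND PROOFS =====

lemma hsDict_contains (c : Char) :
    PySem.Set.contains hsDict c = true ↔ (c = '-' ∨ c = '_' ∨ c = ' ') := by
  simp [hsDict, PySem.Set.contains, PySem.Set.ofList]

-- B's current segment is always a suffix of the input consumed so far
lemma altFold_suffix : ∀ (suf cur : List Char) (done : List String),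
    ∃ l, cur ++ suf = l ++ (suf.foldl altStep (done, cur)).2 := by
  intro suf
  induction suf with
  | nil => intro cur done; exact ⟨[], by simp⟩
  | cons c suf ih =>
    intro cur done
    by_cases h : c = '-' ∨ c = '_' ∨ c = ' '
    · obtain ⟨l, hl⟩ := ih [] (done ++ [String.ofList cur])
      exact ⟨cur ++ [c] ++ l, by simp [altStep, h]; simpa using hl⟩
    · obtain ⟨l, hl⟩ := ih (cur ++ [c]) done
      exact ⟨l, by simpa [altStep, h] using hl⟩

-- main invariant: A's loop from index |mid|+|cur| with psi = |mid|-1 tracks B's fold over the suffix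
lemma hs_key : ∀ (suf mid cur : List Char) (done : List String),
    (PySem.List.pyRange ((mid.length + cur.length : Nat) : Int) (((mid ++ cur ++ suf).length : Nat) : Int) 1).foldl
        (hsStep (mid ++ cur ++ suf)) (done, (done.length : Int), (mid.length : Int) - 1)
      = ((suf.foldl altStep (done, cur)).1,
         ((suf.foldl altStep (done, cur)).1.length : Int),
         (((mid ++ cur ++ suf).length : Nat) : Int) - (suf.foldl altStep (done, cur)).2.length - 1) := by
  intro suf
  induction suf with
  | nil =>
    intro mid cur done
    rw [PySem.List.pyRange_one_eq_nil (by simp)]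
    simp [List.length_append]
  | cons c suf ih =>
    intro mid cur done
    have hlen : ((mid.length + cur.length : Nat) : Int) < (((mid ++ cur ++ c :: suf).length : Nat) : Int) := by
      simp only [List.length_append, List.length_cons]; push_cast; omega
    rw [PySem.List.pyRange_one_cons hlen, List.foldl_cons]
    have hget : PySem.List.pyGet? (mid ++ cur ++ c :: suf) ((mid.length + cur.length : Nat) : Int) = some c := by
      rw [PySem.List.pyGet?_natCast]
      rw [List.append_assoc]
      simp [List.length_append]
    by_cases h : c = '-' ∨ c = '_' ∨ c = ' '
    · have hc : PySem.Set.contains hsDict c = true := (hsDict_contains c).mpr h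
      have hslice : PySem.List.slice (mid ++ cur ++ c :: suf) (some ((mid.length : Int) - 1 + 1))
          (some ((mid.length + cur.length : Nat) : Int)) = cur := by
        have : ((mid.length : Int) - 1 + 1) = ((mid.length : Nat) : Int) := by omega
        rw [this, PySem.List.slice_natCast]
        rw [List.append_assoc, List.drop_left]
        simp
      have key := ih (mid ++ cur ++ [c]) [] (done ++ [String.ofList cur])
      simp only [hsStep, hget, hc, if_pos, hslice]
      simp only [List.append_nil, List.append_assoc, List.length_append, List.length_cons,
        List.length_nil, List.singleton_append] at key ⊢
      simp only [List.foldl_cons, altStep, if_pos h]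
      convert key using 3 <;>
        first
          | rfl
          | (push_cast [List.length_append, List.length_cons, List.length_nil, Prod.mk.injEq]; omega)
    · have hc : PySem.Set.contains hsDict c = false := by
        cases hcb : PySem.Set.contains hsDict c with
        | false => rfl
        | true => exact absurd ((hsDict_contains c).mp hcb) h
      have key := ih mid (cur ++ [c]) done
      simp only [hsStep, hget, hc, Bool.false_eq_true, ite_false]
      simp only [List.append_assoc, List.length_append, List.length_cons,
        List.singleton_append] at key
      simp only [List.foldl_cons, altStep, if_neg h]
      convert key using 3 <;>
        first
          | rfl
          | (push_cast [List.length_append, List.length_cons, List.length_nil, Prod.mk.injEq]; omega)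
          | (simp [List.append_assoc])

-- ===== VERDICT (by name: the statement is the Claim_ definition above) =====
theorem has_spaces_spec : Claim_equal_has_spaces := by
  intro s _
  unfold Spec_has_spaces has_spaces has_spaces_alt
  dsimp only
  have key := hs_key s.toList [] [] []
  simp only [List.nil_append, List.length_nil, Nat.add_zero, Nat.cast_zero, zero_sub] at key
  rw [key]
  obtain ⟨l, hl⟩ := altFold_suffix s.toList [] []
  simp only [List.nil_append] at hl
  set st := s.toList.foldl altStep ([], []) with hst
  have hlen : st.2.length ≤ s.toList.length := by
    rw [hl]; simp
  have hdrop : PySem.List.slice s.toList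
      (some ((s.toList.length : Int) - st.2.length - 1 + 1)) none = st.2 := by
    have h1 : ((s.toList.length : Int) - st.2.length - 1 + 1) = ((s.toList.length - st.2.length : Nat) : Int) := by
      push_cast [hlen]; omega
    rw [h1, PySem.List.slice_from_natCast]
    rw [hl]
    have : (l ++ st.2).length - st.2.length = l.length := by simp
    rw [this, List.drop_left]
  rw [hdrop]
  simp
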